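-- pv_equiv track=rewrite | github.com/irisnunezlpsr/class-samples | 6-3CCipher/cipherTools.py | getReorderedLowercaseAlphabet
-- ===== SOURCE A (Python) =====
-- import string
--
-- def getReorderedLowercaseAlphabet(key):
-- 	alpha = string.ascii_lowercase
-- 	list = []
-- 	c = 0
-- 	while c < 26:
-- 		list.append(alpha[(key + c) % 26])
-- 		c = c + 1
-- 	return list
-- ===== SOURCE B (Python) =====
-- import string
--
-- def getReorderedLowercaseAlphabet(key):
--     k = key % 26
--     return list(string.ascii_lowercase[k:] + string.ascii_lowercase[:k])
-- ===== Notes on version B (the rewrite author's own statement) =====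
-- stated objective: simpler
-- what changed: Replaces the per-character while loop computing alpha[(key+c) mod alphabet-length] with a single slice-and-concatenate rotation of ascii_lowercase at k = key mod alphabet-length.
import Mathlib
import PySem

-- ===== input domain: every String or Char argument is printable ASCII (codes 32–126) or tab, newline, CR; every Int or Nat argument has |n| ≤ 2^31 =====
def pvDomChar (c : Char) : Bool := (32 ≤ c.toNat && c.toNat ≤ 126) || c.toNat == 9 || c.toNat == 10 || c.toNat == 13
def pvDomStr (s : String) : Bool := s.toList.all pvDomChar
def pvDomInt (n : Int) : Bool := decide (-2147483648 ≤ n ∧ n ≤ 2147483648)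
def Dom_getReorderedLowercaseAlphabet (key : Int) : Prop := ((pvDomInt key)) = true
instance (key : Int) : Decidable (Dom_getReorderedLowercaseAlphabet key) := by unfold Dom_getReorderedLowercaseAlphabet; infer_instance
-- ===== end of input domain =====

-- B replaces A's 26-step while loop with per-character modular indexing by a single
-- slice-and-concatenate rotation of the alphabet at k = key % 26 (objective: simpler).

-- ===== PORT A =====
-- while c < 26: list.append(alpha[(key+c)%26]); c += 1   — fold over range(0,26)
def getReorderedLowercaseAlphabet (key : Int) : List String :=
  let alpha := "abcdefghijklmnopqrstuvwxyz"
  (PySem.List.pyRange 0 26 1).foldl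
    (fun acc c =>
      acc ++ [((PySem.Str.pyGet? alpha (PySem.Int.mod (key + c) 26)).map
        (fun ch => String.ofList [ch])).getD ""]) []

-- ===== PORT B =====
-- k = key % 26; list(alpha[k:] + alpha[:k])
def getReorderedLowercaseAlphabet_alt (key : Int) : List String :=
  let alpha := "abcdefghijklmnopqrstuvwxyz"
  let k := PySem.Int.mod key 26
  ((PySem.Str.slice alpha (some k) none).toList ++
   (PySem.Str.slice alpha none (some k)).toList).map (fun ch => String.ofList [ch])

-- ===== PRECONDITION & SPEC =====
def Spec_getReorderedLowercaseAlphabet (key : Int) (out : List String) : Prop := out = getReorderedLowercaseAlphabet_alt key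
instance (key : Int) (out : List String) : Decidable (Spec_getReorderedLowercaseAlphabet key out) := by unfold Spec_getReorderedLowercaseAlphabet; infer_instance

-- ===== CLAIM (what is proved, stated in full; the proofs are below) =====
def Claim_equal_getReorderedLowercaseAlphabet : Prop := ∀ (key : Int), Dom_getReorderedLowercaseAlphabet key → Spec_getReorderedLowercaseAlphabet key (getReorderedLowercaseAlphabet key)

-- ===== LEMMAS AND PROOFS =====

-- Port A is the map c ↦ alphabet[(key%26 + c) % 26] over range(26).
theorem portA_eq_map (key : Int) : getReorderedLowercaseAlphabet key = (List.range 26).map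
    (fun c => String.ofList ["abcdefghijklmnopqrstuvwxyz".toList.getD (((key % 26).toNat + c) % 26) 'a']) := by
  have hr0 : 0 ≤ key % 26 := Int.emod_nonneg _ (by omega)
  have hr1 : key % 26 < 26 := Int.emod_lt_of_pos _ (by omega)
  simp only [getReorderedLowercaseAlphabet]
  rw [PySem.List.foldl_append_singleton_eq_map, PySem.List.pyRange_one, List.map_map]
  refine (List.nil_append _).trans (List.map_congr_left (fun c hc => ?_))
  have hc26 : c < 26 := by simpa using List.mem_range.mp hc
  have hmod : PySem.Int.mod (key + ((0:Int) + (c:Int))) 26 = ((((key % 26).toNat + c) % 26 : Nat) : Int) := by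
    rw [PySem.Int.mod_eq_emod_of_pos (by omega : (0:Int) < 26)]
    omega
  simp only [Function.comp, hmod, PySem.Str.pyGet?_natCast]
  have hlt : (((key % 26).toNat + c) % 26) < "abcdefghijklmnopqrstuvwxyz".toList.length :=
    Nat.mod_lt _ (by omega)
  rw [List.getElem?_eq_getElem hlt, List.getD_eq_getElem _ _ hlt]
  rfl

-- Port B is the alphabet left-rotated by (key % 26).toNat, mapped to 1-char strings.
theorem portB_eq_rotate (key : Int) : getReorderedLowercaseAlphabet_alt key =
    ("abcdefghijklmnopqrstuvwxyz".toList.drop (key % 26).toNat ++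
     "abcdefghijklmnopqrstuvwxyz".toList.take (key % 26).toNat).map (fun ch => String.ofList [ch]) := by
  have hr0 : 0 ≤ key % 26 := Int.emod_nonneg _ (by omega)
  simp only [getReorderedLowercaseAlphabet_alt]
  rw [PySem.Str.toList_slice, PySem.Str.toList_slice,
      PySem.Chars.slice_eq_listSlice, PySem.Chars.slice_eq_listSlice,
      PySem.Int.mod_eq_emod_of_pos (by omega : (0:Int) < 26),
      PySem.List.slice_from _ hr0, PySem.List.slice_to _ hr0]

-- Indexing a 26-element list at (rn + c) % 26 over c ∈ range(26) is the rotation drop rn ++ take rn.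
theorem rotate_eq (L : List Char) (hL : L.length = 26) (rn : Nat) (hrn : rn < 26) :
    (List.range 26).map (fun c => String.ofList [L.getD ((rn + c) % 26) 'a'])
    = (L.drop rn ++ L.take rn).map (fun ch => String.ofList [ch]) := by
  apply List.ext_getElem
  · simp [hL]; omega
  · intro i hi hi'
    have hi26 : i < 26 := by simpa using hi
    simp only [List.getElem_map, List.getElem_range]
    by_cases h : i < 26 - rn
    · have hidx : (rn + i) % 26 = rn + i := Nat.mod_eq_of_lt (by omega)
      rw [List.getElem_append_left (by simp [hL]; omega)]
      rw [List.getElem_drop]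
      rw [hidx, List.getD_eq_getElem _ _ (by omega)]
    · have hidx : (rn + i) % 26 = i - (26 - rn) := by omega
      rw [List.getElem_append_right (by simp [hL]; omega)]
      rw [List.getElem_take]
      rw [hidx, List.getD_eq_getElem _ _ (by omega)]
      congr 1
      simp [hL]

-- ===== VERDICT (by name: the statement is the Claim_ definition above) =====
theorem getReorderedLowercaseAlphabet_spec : Claim_equal_getReorderedLowercaseAlphabet := by
  intro key _
  unfold Spec_getReorderedLowercaseAlphabet
  have hr0 : 0 ≤ key % 26 := Int.emod_nonneg _ (by omega)
  have hr1 : key % 26 < 26 := Int.emod_lt_of_pos _ (by omega)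
  rw [portA_eq_map, portB_eq_rotate]
  exact rotate_eq _ rfl _ (by omega)
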